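-- pv_equiv track=rewrite | github.com/frpakin/aoc2022 | 20221215.py | part1
-- ===== SOURCE A (Python) =====
-- def part1(input, y):
--     dist = [ abs(d[0][0]-d[1][0])+abs(d[0][1]-d[1][1])  for d in input ]
--     scans = []
--     for i, d in enumerate(input):
--         if d[0][1] - dist[i] <= y <= d[0][1] + dist[i]:
--             avail = dist[i] - abs(y-d[0][1])
--             scans.append( (d[0][0]-avail, d[0][0]+avail) )
--
--     scans.sort(key=lambda s:s[0])
--     ret = scans[0][1]-scans[0][0]
--     min_x = scans[0][0]
--     max_x = scans[0][1]
--     for i,s in enumerate(scans[1:], 1):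
--         if min_x <= s[0] <= max_x:
--             if min_x <= s[1] <= max_x:
--                 pass
--             else:
--                 ret += s[1]-max_x
--                 max_x = s[1]
--         else:
--             ret += s[1]-s[0]
--             min_x = s[0]
--             max_x = s[1]
--     return ret
-- ===== SOURCE B (Python) =====
-- def part1(input, y):
--     events = []
--     for (sx, sy), (bx, by) in input:
--         a = abs(sx - bx) + abs(sy - by) - abs(y - sy)
--         if a >= 0:
--             events.append((sx - a, 1))
--             events.append((sx + a, -1))
--     events.sort(key=lambda e: e[0])
--     total = 0
--     depth = 0
--     prev = events[0][0]
--     for x, d in events: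
--         if depth > 0:
--             total += x - prev
--         depth += d
--         prev = x
--     return total
-- ===== Notes on version B (the rewrite author's own statement) =====
-- stated objective: alternative
-- what changed: B replaces A's sort-intervals-then-merge state machine (ret/min_x/max_x with three branches) by a sweep line: each covered sensor emits +1/-1 boundary events, the events are sorted by coordinate, and one pass sums segment lengths while a depth counter is positive.
import Mathlib
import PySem

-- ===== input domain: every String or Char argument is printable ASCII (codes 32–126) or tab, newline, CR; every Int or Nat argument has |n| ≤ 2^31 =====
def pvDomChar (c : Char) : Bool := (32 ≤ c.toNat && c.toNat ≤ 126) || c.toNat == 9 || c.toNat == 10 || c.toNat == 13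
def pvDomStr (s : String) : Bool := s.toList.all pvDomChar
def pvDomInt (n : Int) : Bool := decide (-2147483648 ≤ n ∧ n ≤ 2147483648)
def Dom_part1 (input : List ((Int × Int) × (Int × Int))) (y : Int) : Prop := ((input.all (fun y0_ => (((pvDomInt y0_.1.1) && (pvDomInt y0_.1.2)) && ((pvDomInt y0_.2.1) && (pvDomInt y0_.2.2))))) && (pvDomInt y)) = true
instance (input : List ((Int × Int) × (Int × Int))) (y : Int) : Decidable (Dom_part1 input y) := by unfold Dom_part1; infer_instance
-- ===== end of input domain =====

-- B replaces A's sort-intervals-then-merge state machine by a sweep line over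
-- sorted ±1 boundary events with a depth counter (objective: alternative algorithm).

-- ===== PORT A =====
-- A-side helpers: the body of the scans-building loop and of the merge loop, verbatim.
def pvScanStepA (y : Int) (dist : List Int) (acc : List (Int × Int))
    (p : Int × ((Int × Int) × (Int × Int))) : List (Int × Int) :=
  let di := PySem.List.pyGetD dist p.1 0
  if p.2.1.2 - di ≤ y ∧ y ≤ p.2.1.2 + di then
    let avail := di - |y - p.2.1.2|
    acc ++ [(p.2.1.1 - avail, p.2.1.1 + avail)]
  else acc

def pvMergeStepA (st : Int × Int × Int) (s : Int × Int) : Int × Int × Int :=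
  if st.2.1 ≤ s.1 ∧ s.1 ≤ st.2.2 then
    if st.2.1 ≤ s.2 ∧ s.2 ≤ st.2.2 then st
    else (st.1 + (s.2 - st.2.2), st.2.1, s.2)
  else (st.1 + (s.2 - s.1), s.1, s.2)

def part1 (input : List ((Int × Int) × (Int × Int))) (y : Int) : Int :=
  let dist := input.map (fun d => |d.1.1 - d.2.1| + |d.1.2 - d.2.2|)
  let scans := (PySem.List.enumerate input 0).foldl (pvScanStepA y dist) []
  let scans := PySem.List.sorted scans (fun s => s.1) false
  match scans with
  | [] => 0   -- Python raises IndexError on scans[0] here; excluded by Pre_part1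
  | s0 :: _ =>
    ((PySem.List.enumerate (PySem.List.slice scans (some 1) none) 1).foldl
        (fun st p => pvMergeStepA st p.2) (s0.2 - s0.1, s0.1, s0.2)).1

-- ===== PORT B =====
-- B-side helpers: the event-emitting loop body and the sweep step, verbatim from Source B.
def pvEventStepB (y : Int) (acc : List (Int × Int)) (p : (Int × Int) × (Int × Int)) : List (Int × Int) :=
  let a := |p.1.1 - p.2.1| + |p.1.2 - p.2.2| - |y - p.1.2|
  if 0 ≤ a then acc ++ [(p.1.1 - a, 1), (p.1.1 + a, -1)] else acc

def pvSweepStepB (st : Int × Int × Int) (e : Int × Int) : Int × Int × Int :=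
  ((if 0 < st.2.1 then st.1 + (e.1 - st.2.2) else st.1), st.2.1 + e.2, e.1)

def part1_alt (input : List ((Int × Int) × (Int × Int))) (y : Int) : Int :=
  let events := input.foldl (pvEventStepB y) []
  let events := PySem.List.sorted events (fun e => e.1) false
  match events with
  | [] => 0   -- Python raises IndexError on events[0] here; excluded by Pre_part1
  | e0 :: _ => (events.foldl pvSweepStepB (0, 0, e0.1)).1

-- ===== PRECONDITION & SPEC =====
-- Pre_part1: at least one sensor's coverage reaches row y; otherwise both event/scan lists
-- are empty and the Python A raises IndexError on scans[0] (B likewise on events[0]).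
def Pre_part1 (input : List ((Int × Int) × (Int × Int))) (y : Int) : Prop :=
  ∃ p ∈ input, |y - p.1.2| ≤ |p.1.1 - p.2.1| + |p.1.2 - p.2.2|
instance (input : List ((Int × Int) × (Int × Int))) (y : Int) : Decidable (Pre_part1 input y) := by
  unfold Pre_part1; infer_instance

def pvWitness_part1 : (List ((Int × Int) × (Int × Int))) × Int := ([((0, 0), (0, 1))], 0)

def Spec_part1 (input : List ((Int × Int) × (Int × Int))) (y : Int) (out : Int) : Prop := out = part1_alt input y
instance (input : List ((Int × Int) × (Int × Int))) (y : Int) (out : Int) : Decidable (Spec_part1 input y out) := by unfold Spec_part1; infer_instance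

-- ===== CLAIM (what is proved, stated in full; the proofs are below) =====
def Claim_equal_part1 : Prop := ∀ (input : List ((Int × Int) × (Int × Int))) (y : Int), Dom_part1 input y → Pre_part1 input y → Spec_part1 input y (part1 input y)

-- ===== LEMMAS AND PROOFS =====

-- Proof-side vocabulary: an executable Ico-Finset on Int, the interval list both programs
-- implicitly build, the two boundary events of an interval, the covered set, and the final
-- sweep coordinate.
def pvIco (a b : Int) : Finset Int :=
  ((List.range (b - a).toNat).map (fun i : Nat => a + (i : Int))).toFinset

def pvIvStep (y : Int) (acc : List (Int × Int)) (p : (Int × Int) × (Int × Int)) : List (Int × Int) :=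
  let a := |p.1.1 - p.2.1| + |p.1.2 - p.2.2| - |y - p.1.2|
  if 0 ≤ a then acc ++ [(p.1.1 - a, p.1.1 + a)] else acc

def pvIvs (y : Int) (input : List ((Int × Int) × (Int × Int))) : List (Int × Int) :=
  input.foldl (pvIvStep y) []

def pvPair (s : Int × Int) : List (Int × Int) := [(s.1, 1), (s.2, -1)]

def pvCov (l : List (Int × Int)) : Finset Int :=
  l.foldr (fun s acc => pvIco s.1 s.2 ∪ acc) ∅

def pvLast (prev : Int) (l : List (Int × Int)) : Int :=
  l.foldl (fun _ e => e.1) prev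

lemma pv_mem_Ico (a b p : Int) : p ∈ pvIco a b ↔ a ≤ p ∧ p < b := by
  simp only [pvIco, List.mem_toFinset, List.mem_map, List.mem_range]
  constructor
  · rintro ⟨i, hi, rfl⟩; omega
  · rintro ⟨h1, h2⟩; exact ⟨(p - a).toNat, by omega, by omega⟩

lemma pv_card_Ico (a b : Int) : (pvIco a b).card = (b - a).toNat := by
  rw [pvIco, List.toFinset_card_of_nodup, List.length_map, List.length_range]
  exact (List.nodup_range).map (fun i j h => by omega)

-- A's interval-building pass equals pvIvs.
lemma pv_scans_eq (input : List ((Int × Int) × (Int × Int))) (y : Int) :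
    (PySem.List.enumerate input 0).foldl
      (pvScanStepA y (input.map (fun d => |d.1.1 - d.2.1| + |d.1.2 - d.2.2|))) []
    = pvIvs y input := by
  rw [pvIvs, PySem.List.foldl_congr_mem
    (g := fun acc (p : Int × ((Int × Int) × (Int × Int))) => pvIvStep y acc p.2)]
  · conv_rhs => rw [← PySem.List.map_snd_enumerate input 0, List.foldl_map]
  · intro acc p hp
    rw [PySem.List.mem_enumerate_iff] at hp
    obtain ⟨k, hk, rfl⟩ := hp
    simp only [pvScanStepA, pvIvStep]
    have hget : PySem.List.pyGetD (input.map (fun d => |d.1.1 - d.2.1| + |d.1.2 - d.2.2|))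
        ((0 : Int) + (k : Int)) 0 = |input[k].1.1 - input[k].2.1| + |input[k].1.2 - input[k].2.2| := by
      have : (0 : Int) + (k : Int) = ((k : Nat) : Int) := by omega
      rw [this, PySem.List.pyGetD_natCast]
      rw [List.getD_eq_getElem?_getD, List.getElem?_map, List.getElem?_eq_getElem hk]
      rfl
    rw [hget]
    rcases abs_cases (y - input[k].1.2) with ⟨h1, h2⟩ | ⟨h1, h2⟩ <;>
      rcases le_or_gt 0 (|input[k].1.1 - input[k].2.1| + |input[k].1.2 - input[k].2.2| - |y - input[k].1.2|) with h3 | h3 <;>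
      · first
        | (rw [if_pos (by omega), if_pos (by omega)])
        | (rw [if_neg (by omega), if_neg (by omega)])

-- B's event-building pass is pvIvs flattened into boundary events.
lemma pv_events_flat (y : Int) : ∀ (input : List ((Int × Int) × (Int × Int))) (I : List (Int × Int)),
    input.foldl (pvEventStepB y) (I.flatMap pvPair) = (input.foldl (pvIvStep y) I).flatMap pvPair := by
  intro input
  induction input with
  | nil => intro I; rfl
  | cons p t ih =>
    intro I
    by_cases h : 0 ≤ |p.1.1 - p.2.1| + |p.1.2 - p.2.2| - |y - p.1.2|
    · have e1 : pvEventStepB y (I.flatMap pvPair) p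
          = (I ++ [(p.1.1 - (|p.1.1 - p.2.1| + |p.1.2 - p.2.2| - |y - p.1.2|),
                    p.1.1 + (|p.1.1 - p.2.1| + |p.1.2 - p.2.2| - |y - p.1.2|))]).flatMap pvPair := by
        simp only [pvEventStepB]
        rw [if_pos h]
        simp [pvPair]
      have e2 : pvIvStep y I p
          = I ++ [(p.1.1 - (|p.1.1 - p.2.1| + |p.1.2 - p.2.2| - |y - p.1.2|),
                   p.1.1 + (|p.1.1 - p.2.1| + |p.1.2 - p.2.2| - |y - p.1.2|))] := by
        simp only [pvIvStep]
        rw [if_pos h]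
      simp only [List.foldl_cons, e1, e2, ih]
    · have e1 : pvEventStepB y (I.flatMap pvPair) p = I.flatMap pvPair := by
        simp only [pvEventStepB]
        rw [if_neg h]
      have e2 : pvIvStep y I p = I := by
        simp only [pvIvStep]
        rw [if_neg h]
      simp only [List.foldl_cons, e1, e2, ih]

-- Every interval pvIvs collects has lo ≤ hi.
lemma pv_iv_lo_le_hi (y : Int) : ∀ (input : List ((Int × Int) × (Int × Int)))
    (acc : List (Int × Int)), (∀ s ∈ acc, s.1 ≤ s.2) →
    ∀ s ∈ input.foldl (pvIvStep y) acc, s.1 ≤ s.2 := by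
  intro input
  induction input with
  | nil => intro acc h; simpa using h
  | cons p t ih =>
    intro acc h
    simp only [List.foldl_cons]
    apply ih
    intro s hs
    simp only [pvIvStep] at hs
    split_ifs at hs with h0
    · rcases List.mem_append.1 hs with hs | hs
      · exact h s hs
      · simp only [List.mem_singleton] at hs; subst hs; simp; omega
    · exact h s hs

-- If the fold produces [], the accumulator was [] and no sensor covers row y.
lemma pv_ivs_nil (y : Int) : ∀ (input : List ((Int × Int) × (Int × Int))) (acc : List (Int × Int)),
    input.foldl (pvIvStep y) acc = [] →
    acc = [] ∧ ∀ p ∈ input, ¬ (0 ≤ |p.1.1 - p.2.1| + |p.1.2 - p.2.2| - |y - p.1.2|) := by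
  intro input
  induction input with
  | nil => intro acc h; exact ⟨h, by simp⟩
  | cons p t ih =>
    intro acc h
    simp only [List.foldl_cons] at h
    obtain ⟨h1, h2⟩ := ih _ h
    simp only [pvIvStep] at h1
    split_ifs at h1 with hc
    · simp at h1
    · refine ⟨h1, ?_⟩
      intro q hq
      rcases List.mem_cons.1 hq with rfl | hq
      · simpa using hc
      · exact h2 q hq

-- A's merge loop ignores the enumerate index.
lemma pv_enum_fold (rest : List (Int × Int)) (init : Int × Int × Int) :
    (PySem.List.enumerate rest 1).foldl (fun st p => pvMergeStepA st p.2) init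
      = rest.foldl pvMergeStepA init := by
  conv_rhs => rw [← PySem.List.map_snd_enumerate rest 1, List.foldl_map]

-- Membership in a foldr of interval unions over any base, and in the covered set.
lemma pv_mem_foldr (l : List (Int × Int)) (B : Finset Int) (p : Int) :
    p ∈ l.foldr (fun s acc => pvIco s.1 s.2 ∪ acc) B
      ↔ (∃ s ∈ l, s.1 ≤ p ∧ p < s.2) ∨ p ∈ B := by
  induction l with
  | nil => simp
  | cons s t ih => simp [ih, pv_mem_Ico, or_assoc]

lemma pv_mem_cov (l : List (Int × Int)) (p : Int) :
    p ∈ pvCov l ↔ ∃ s ∈ l, s.1 ≤ p ∧ p < s.2 := by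
  simp [pvCov, pv_mem_foldr]

-- Splitting the measured part of a set at an intermediate coordinate.
lemma pv_filter_split (S : Finset Int) (a b : Int) (hab : a ≤ b) :
    (S.filter (fun p => p < b)).card
      = (S.filter (fun p => p < a)).card + (S.filter (fun p => a ≤ p ∧ p < b)).card := by
  have h1 : S.filter (fun p => p < b)
      = S.filter (fun p => p < a) ∪ S.filter (fun p => a ≤ p ∧ p < b) := by
    ext p
    simp only [Finset.mem_filter, Finset.mem_union]
    constructor
    · rintro ⟨hS, hb'⟩
      by_cases hpa : p < a
      · exact Or.inl ⟨hS, hpa⟩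
      · exact Or.inr ⟨hS, not_lt.1 hpa, hb'⟩
    · rintro (⟨hS, h⟩ | ⟨hS, _, h2⟩)
      · exact ⟨hS, lt_of_lt_of_le h hab⟩
      · exact ⟨hS, h2⟩
  rw [h1, Finset.card_union_of_disjoint]
  rw [Finset.disjoint_left]
  intro p hp1 hp2
  simp only [Finset.mem_filter] at hp1 hp2
  omega

-- Signed sum of the boundary events at coordinates ≤ c counts the intervals straddling c.
lemma pv_count (c : Int) : ∀ (l : List (Int × Int)), (∀ s ∈ l, s.1 ≤ s.2) →
    (((l.flatMap pvPair).filter (fun e => decide (e.1 ≤ c))).map Prod.snd).sum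
      = (l.countP (fun s => decide (s.1 ≤ c ∧ c < s.2)) : Int) := by
  intro l
  induction l with
  | nil => simp
  | cons s t ih =>
    intro h
    have hst : s.1 ≤ s.2 := h s (by simp)
    simp only [List.flatMap_cons, List.filter_append, List.map_append, List.sum_append,
      List.countP_cons]
    rw [ih (fun x hx => h x (by simp [hx]))]
    by_cases h1 : s.1 ≤ c <;> by_cases h2 : s.2 ≤ c <;>
      simp [pvPair, h1, h2] <;> omega

-- pvLast bounds: on a sorted, prev-bounded list it dominates prev and every coordinate.
lemma pv_last_ge : ∀ (l : List (Int × Int)) (prev : Int),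
    l.Pairwise (fun a b => a.1 ≤ b.1) → (∀ e ∈ l, prev ≤ e.1) →
    prev ≤ pvLast prev l ∧ ∀ e ∈ l, e.1 ≤ pvLast prev l := by
  intro l
  induction l with
  | nil => intro prev _ _; exact ⟨le_rfl, by simp⟩
  | cons a t ih =>
    intro prev hpw hb
    have hpa : prev ≤ a.1 := hb a (by simp)
    obtain ⟨hR, hpwt⟩ := List.pairwise_cons.1 hpw
    have h' := ih a.1 hpwt hR
    have hl : pvLast prev (a :: t) = pvLast a.1 t := rfl
    constructor
    · rw [hl]; exact le_trans hpa h'.1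
    · intro e he
      rcases List.mem_cons.1 he with rfl | he
      · rw [hl]; exact h'.1
      · rw [hl]; exact h'.2 e he

-- Core B lemma: the sweep over the sorted event list measures the covered set.
lemma pv_sweep (ivs : List (Int × Int)) (hlh : ∀ s ∈ ivs, s.1 ≤ s.2) :
    ∀ (es2 es1 : List (Int × Int)) (prev depth : Int),
    (es1 ++ es2).Pairwise (fun a b => a.1 ≤ b.1) →
    (es1 ++ es2).Perm (ivs.flatMap pvPair) →
    (∀ e ∈ es1, e.1 ≤ prev) → (∀ e ∈ es2, prev ≤ e.1) →
    depth = (es1.map Prod.snd).sum →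
    (es2.foldl pvSweepStepB ((((pvCov ivs).filter (fun p => p < prev)).card : Int), depth, prev)).1
      = ((((pvCov ivs).filter (fun p => p < pvLast prev es2)).card : Int)) := by
  intro es2
  induction es2 with
  | nil => intro es1 prev depth _ _ _ _ _; rfl
  | cons e rest ih =>
    intro es1 prev depth hpw hperm hb1 hb2 hd
    have hpe : prev ≤ e.1 := hb2 e (by simp)
    have hpwtail : (e :: rest).Pairwise (fun a b => a.1 ≤ b.1) :=
      (List.pairwise_append.1 hpw).2.1
    have hrest_ge : ∀ r ∈ rest, e.1 ≤ r.1 := (List.pairwise_cons.1 hpwtail).1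
    -- the new running total is the measure below e.1
    have hkey : (if 0 < depth then
          ((((pvCov ivs).filter (fun p => p < prev)).card : Int) + (e.1 - prev))
        else (((pvCov ivs).filter (fun p => p < prev)).card : Int))
        = (((pvCov ivs).filter (fun p => p < e.1)).card : Int) := by
      by_cases hlt : prev < e.1
      · -- the processed events are exactly those at coordinates ≤ prev
        have hfilter : (es1 ++ e :: rest).filter (fun a => decide (a.1 ≤ prev)) = es1 := by
          rw [List.filter_append]
          have hf1 : es1.filter (fun a => decide (a.1 ≤ prev)) = es1 :=
            List.filter_eq_self.2 (fun a ha => by simp [hb1 a ha])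
          have hf2 : (e :: rest).filter (fun a => decide (a.1 ≤ prev)) = [] := by
            rw [List.filter_eq_nil_iff]
            intro a ha
            rcases List.mem_cons.1 ha with rfl | ha
            · simp; omega
            · have := hrest_ge a ha; simp; omega
          rw [hf1, hf2, List.append_nil]
        have hdepth : depth = (ivs.countP (fun s => decide (s.1 ≤ prev ∧ prev < s.2)) : Int) := by
          calc depth = (es1.map Prod.snd).sum := hd
            _ = (((es1 ++ e :: rest).filter (fun a => decide (a.1 ≤ prev))).map Prod.snd).sum := by
                rw [hfilter]
            _ = (((ivs.flatMap pvPair).filter (fun a => decide (a.1 ≤ prev))).map Prod.snd).sum :=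
                List.Perm.sum_eq (List.Perm.map _ (List.Perm.filter _ hperm))
            _ = _ := pv_count prev ivs hlh
        have hdich : ∀ s ∈ ivs, (s.1 ≤ prev ∨ e.1 ≤ s.1) ∧ (s.2 ≤ prev ∨ e.1 ≤ s.2) := by
          intro s hs
          have hc : ∀ c ∈ ivs.flatMap pvPair, c.1 ≤ prev ∨ e.1 ≤ c.1 := by
            intro c hcm
            have hcm' : c ∈ es1 ++ e :: rest := hperm.mem_iff.2 hcm
            rcases List.mem_append.1 hcm' with h | h
            · exact Or.inl (hb1 c h)
            · rcases List.mem_cons.1 h with rfl | h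
              · exact Or.inr le_rfl
              · exact Or.inr (hrest_ge c h)
          exact ⟨hc (s.1, 1) (List.mem_flatMap.2 ⟨s, hs, by simp [pvPair]⟩),
                 hc (s.2, -1) (List.mem_flatMap.2 ⟨s, hs, by simp [pvPair]⟩)⟩
        have hsplit := pv_filter_split (pvCov ivs) prev e.1 (le_of_lt hlt)
        by_cases hdpos : 0 < depth
        · have hex : ∃ s ∈ ivs, s.1 ≤ prev ∧ prev < s.2 := by
            have : 0 < ivs.countP (fun s => decide (s.1 ≤ prev ∧ prev < s.2)) := by
              rw [hdepth] at hdpos; exact_mod_cast hdpos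
            obtain ⟨s, hs, hps⟩ := List.countP_pos_iff.1 this
            exact ⟨s, hs, of_decide_eq_true hps⟩
          have hstrip : (pvCov ivs).filter (fun p => prev ≤ p ∧ p < e.1) = pvIco prev e.1 := by
            ext p
            simp only [Finset.mem_filter, pv_mem_cov, pv_mem_Ico]
            constructor
            · rintro ⟨_, h1, h2⟩; exact ⟨h1, h2⟩
            · rintro ⟨h1, h2⟩
              obtain ⟨s, hs, hs1, hs2⟩ := hex
              have hs2' : e.1 ≤ s.2 := by
                rcases (hdich s hs).2 with h | h
                · omega
                · exact h
              exact ⟨⟨s, hs, by omega, by omega⟩, h1, h2⟩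
          rw [if_pos hdpos, hsplit, hstrip, pv_card_Ico]
          push_cast
          omega
        · have hnex : ¬ ∃ s ∈ ivs, s.1 ≤ prev ∧ prev < s.2 := by
            rintro ⟨s, hs, h1, h2⟩
            have : 0 < ivs.countP (fun s => decide (s.1 ≤ prev ∧ prev < s.2)) :=
              List.countP_pos_iff.2 ⟨s, hs, decide_eq_true ⟨h1, h2⟩⟩
            rw [hdepth] at hdpos
            omega
          have hstrip : (pvCov ivs).filter (fun p => prev ≤ p ∧ p < e.1) = ∅ := by
            rw [Finset.filter_eq_empty_iff]
            rintro p hp ⟨h1, h2⟩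
            obtain ⟨s, hs, hs1, hs2⟩ := (pv_mem_cov ivs p).1 hp
            have hs1' : s.1 ≤ prev := by
              rcases (hdich s hs).1 with h | h
              · exact h
              · omega
            exact hnex ⟨s, hs, hs1', by omega⟩
          rw [if_neg hdpos, hsplit, hstrip]
          simp
      · have he : e.1 = prev := le_antisymm (not_lt.1 hlt) hpe
        rw [he]
        split_ifs <;> omega
    rw [List.foldl_cons]
    have hstep : pvSweepStepB ((((pvCov ivs).filter (fun p => p < prev)).card : Int), depth, prev) e
        = ((((pvCov ivs).filter (fun p => p < e.1)).card : Int), depth + e.2, e.1) := by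
      simp only [pvSweepStepB]
      rw [Prod.mk.injEq, Prod.mk.injEq]
      exact ⟨hkey, rfl, rfl⟩
    rw [hstep]
    have hcall := ih (es1 ++ [e]) e.1 (depth + e.2)
      (by rwa [List.append_assoc, List.singleton_append])
      (by rwa [List.append_assoc, List.singleton_append])
      (by intro x hx
          rcases List.mem_append.1 hx with h | h
          · exact le_trans (hb1 x h) hpe
          · rcases List.mem_singleton.1 h with rfl; exact le_rfl)
      hrest_ge
      (by rw [hd, List.map_append, List.sum_append]; simp)
    exact hcall

-- Core A lemma: the merge fold measures the union of the remaining intervals over S.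
lemma pv_merge : ∀ (rest : List (Int × Int)) (S : Finset Int) (min_x max_x : Int),
    rest.Pairwise (fun a b => a.1 ≤ b.1) → (∀ s ∈ rest, s.1 ≤ s.2) →
    (∀ s ∈ rest, min_x ≤ s.1) → min_x ≤ max_x →
    pvIco min_x max_x ⊆ S → (∀ p ∈ S, p < max_x) →
    (rest.foldl pvMergeStepA ((S.card : Int), min_x, max_x)).1
      = (((rest.foldr (fun s acc => pvIco s.1 s.2 ∪ acc) S).card : Int)) := by
  intro rest
  induction rest with
  | nil => intro S min_x max_x _ _ _ _ _ _; rfl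
  | cons s t ih =>
    intro S min_x max_x hpw hlh hmin hmm hsub hub
    have hs1 : min_x ≤ s.1 := hmin s (by simp)
    have hs12 : s.1 ≤ s.2 := hlh s (by simp)
    obtain ⟨hhead, hpwt⟩ := List.pairwise_cons.1 hpw
    rw [List.foldl_cons]
    by_cases hA : s.1 ≤ max_x
    · by_cases hB : s.2 ≤ max_x
      · have e1 : pvMergeStepA ((S.card : Int), min_x, max_x) s = ((S.card : Int), min_x, max_x) := by
          simp only [pvMergeStepA]
          rw [if_pos ⟨hs1, hA⟩, if_pos ⟨le_trans hs1 hs12, hB⟩]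
        rw [e1, ih S min_x max_x hpwt (fun x hx => hlh x (by simp [hx]))
          (fun x hx => hmin x (by simp [hx])) hmm hsub hub]
        have hset : (s :: t).foldr (fun s acc => pvIco s.1 s.2 ∪ acc) S
            = t.foldr (fun s acc => pvIco s.1 s.2 ∪ acc) S := by
          rw [List.foldr_cons]
          apply Finset.union_eq_right.2
          intro p hp
          rw [pv_mem_Ico] at hp
          apply (pv_mem_foldr t S p).2
          exact Or.inr (hsub ((pv_mem_Ico min_x max_x p).2 (by omega)))
        rw [hset]
      · -- extend the current block up to s.2
        have hdisj : Disjoint S (pvIco max_x s.2) := by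
          rw [Finset.disjoint_left]
          intro p hp1 hp2
          rw [pv_mem_Ico] at hp2
          have := hub p hp1
          omega
        have hcard : ((S ∪ pvIco max_x s.2).card : Int) = (S.card : Int) + (s.2 - max_x) := by
          rw [Finset.card_union_of_disjoint hdisj, pv_card_Ico]
          push_cast
          omega
        have e1 : pvMergeStepA ((S.card : Int), min_x, max_x) s
            = (((S ∪ pvIco max_x s.2).card : Int), min_x, s.2) := by
          simp only [pvMergeStepA]
          rw [if_pos ⟨hs1, hA⟩, if_neg (by omega), Prod.mk.injEq, Prod.mk.injEq]
          exact ⟨by rw [hcard], rfl, rfl⟩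
        rw [e1, ih (S ∪ pvIco max_x s.2) min_x s.2 hpwt
          (fun x hx => hlh x (by simp [hx]))
          (fun x hx => hmin x (by simp [hx]))
          (by omega)
          (by intro p hp
              rw [pv_mem_Ico] at hp
              by_cases hpm : p < max_x
              · exact Finset.mem_union_left _ (hsub ((pv_mem_Ico min_x max_x p).2 (by omega)))
              · exact Finset.mem_union_right _ ((pv_mem_Ico max_x s.2 p).2 (by omega)))
          (by intro p hp
              rcases Finset.mem_union.1 hp with h | h
              · have := hub p h; omega
              · rw [pv_mem_Ico] at h; omega)]
        have hset : (s :: t).foldr (fun s acc => pvIco s.1 s.2 ∪ acc) S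
            = t.foldr (fun s acc => pvIco s.1 s.2 ∪ acc) (S ∪ pvIco max_x s.2) := by
          ext p
          rw [List.foldr_cons, Finset.mem_union, pv_mem_foldr, pv_mem_foldr, pv_mem_Ico,
            Finset.mem_union, pv_mem_Ico]
          constructor
          · rintro (⟨h1, h2⟩ | (h | h))
            · by_cases hpm : p < max_x
              · exact Or.inr (Or.inl (hsub ((pv_mem_Ico min_x max_x p).2 (by omega))))
              · exact Or.inr (Or.inr (by omega))
            · exact Or.inl h
            · exact Or.inr (Or.inl h)
          · rintro (h | (h | ⟨h1, h2⟩))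
            · exact Or.inr (Or.inl h)
            · exact Or.inr (Or.inr h)
            · exact Or.inl ⟨by omega, h2⟩
        rw [hset]
    · -- start a new block at s
      have hdisj : Disjoint S (pvIco s.1 s.2) := by
        rw [Finset.disjoint_left]
        intro p hp1 hp2
        rw [pv_mem_Ico] at hp2
        have := hub p hp1
        omega
      have hcard : ((S ∪ pvIco s.1 s.2).card : Int) = (S.card : Int) + (s.2 - s.1) := by
        rw [Finset.card_union_of_disjoint hdisj, pv_card_Ico]
        push_cast
        omega
      have e1 : pvMergeStepA ((S.card : Int), min_x, max_x) s
          = (((S ∪ pvIco s.1 s.2).card : Int), s.1, s.2) := by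
        simp only [pvMergeStepA]
        rw [if_neg (by omega), Prod.mk.injEq, Prod.mk.injEq]
        exact ⟨by rw [hcard], rfl, rfl⟩
      rw [e1, ih (S ∪ pvIco s.1 s.2) s.1 s.2 hpwt
        (fun x hx => hlh x (by simp [hx]))
        (fun x hx => hhead x hx)
        hs12
        (Finset.subset_union_right)
        (by intro p hp
            rcases Finset.mem_union.1 hp with h | h
            · have := hub p h; omega
            · rw [pv_mem_Ico] at h; omega)]
      have hset : (s :: t).foldr (fun s acc => pvIco s.1 s.2 ∪ acc) S
          = t.foldr (fun s acc => pvIco s.1 s.2 ∪ acc) (S ∪ pvIco s.1 s.2) := by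
        ext p
        rw [List.foldr_cons, Finset.mem_union, pv_mem_foldr, pv_mem_foldr,
          Finset.mem_union]
        constructor
        · rintro (h | (h | h))
          · exact Or.inr (Or.inr h)
          · exact Or.inl h
          · exact Or.inr (Or.inl h)
        · rintro (h | (h | h))
          · exact Or.inr (Or.inl h)
          · exact Or.inr (Or.inr h)
          · exact Or.inl h
      rw [hset]

-- ===== VERDICT (by name: the statement is the Claim_ definition above) =====
theorem part1_spec : Claim_equal_part1 := by
  intro input y _ hpre
  unfold Spec_part1
  have hlh : ∀ s ∈ pvIvs y input, s.1 ≤ s.2 := pv_iv_lo_le_hi y input [] (by simp)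
  have hne : pvIvs y input ≠ [] := by
    intro h0
    obtain ⟨p, hp, hcov⟩ := hpre
    exact (pv_ivs_nil y input [] h0).2 p hp (by linarith)
  -- A computes the measure of the covered set
  have hA : part1 input y = (((pvCov (pvIvs y input)).card : Int)) := by
    simp only [part1]
    rw [pv_scans_eq]
    cases hss : PySem.List.sorted (pvIvs y input) (fun s => s.1) false with
    | nil => exact absurd ((PySem.List.sorted_eq_nil_iff _ _ _).1 hss) hne
    | cons s0 rest =>
      have hpw : (s0 :: rest).Pairwise (fun a b => a.1 ≤ b.1) := by
        rw [← hss]; exact PySem.List.sorted_pairwise _ _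
      have hmemiff : ∀ s, s ∈ pvIvs y input ↔ s ∈ s0 :: rest := by
        intro s; rw [← hss, PySem.List.mem_sorted]
      have hs0 : s0.1 ≤ s0.2 := hlh s0 ((hmemiff s0).2 (by simp))
      obtain ⟨hhead, hpwt⟩ := List.pairwise_cons.1 hpw
      rw [PySem.List.slice_from_one]
      simp only [List.tail_cons]
      rw [pv_enum_fold]
      have hinit : s0.2 - s0.1 = ((pvIco s0.1 s0.2).card : Int) := by
        rw [pv_card_Ico]; omega
      rw [hinit, pv_merge rest (pvIco s0.1 s0.2) s0.1 s0.2 hpwt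
        (fun x hx => hlh x ((hmemiff x).2 (by simp [hx])))
        (fun x hx => hhead x hx)
        hs0
        (by intro p hp; exact hp)
        (by intro p hp; exact ((pv_mem_Ico s0.1 s0.2 p).1 hp).2)]
      have hset : rest.foldr (fun s acc => pvIco s.1 s.2 ∪ acc) (pvIco s0.1 s0.2)
          = pvCov (pvIvs y input) := by
        ext p
        rw [pv_mem_foldr, pv_mem_cov, pv_mem_Ico]
        constructor
        · rintro (⟨s, hs, h1, h2⟩ | ⟨h1, h2⟩)
          · exact ⟨s, (hmemiff s).2 (by simp [hs]), h1, h2⟩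
          · exact ⟨s0, (hmemiff s0).2 (by simp), h1, h2⟩
        · rintro ⟨s, hs, h1, h2⟩
          rcases List.mem_cons.1 ((hmemiff s).1 hs) with rfl | hs'
          · exact Or.inr ⟨h1, h2⟩
          · exact Or.inl ⟨s, hs', h1, h2⟩
      rw [hset]
  -- B computes the measure of the covered set
  have hB : part1_alt input y = (((pvCov (pvIvs y input)).card : Int)) := by
    simp only [part1_alt]
    have hev : input.foldl (pvEventStepB y) [] = (pvIvs y input).flatMap pvPair := by
      have := pv_events_flat y input []
      simpa [pvIvs] using this
    rw [hev]
    cases hse : PySem.List.sorted ((pvIvs y input).flatMap pvPair) (fun e => e.1) false with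
    | nil =>
      exfalso
      have h0 : (pvIvs y input).flatMap pvPair = [] := (PySem.List.sorted_eq_nil_iff _ _ _).1 hse
      cases hiv : pvIvs y input with
      | nil => exact hne hiv
      | cons a t => rw [hiv] at h0; simp [pvPair] at h0
    | cons e0 restE =>
      have hperm : (e0 :: restE).Perm ((pvIvs y input).flatMap pvPair) := by
        rw [← hse]; exact PySem.List.sorted_perm _ _ _
      have hpw : (e0 :: restE).Pairwise (fun a b => a.1 ≤ b.1) := by
        rw [← hse]; exact PySem.List.sorted_pairwise _ _
      have hmin : ∀ e ∈ (pvIvs y input).flatMap pvPair, e0.1 ≤ e.1 := by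
        exact PySem.List.key_head_sorted_le _ _ hse
      have hmin' : ∀ e ∈ e0 :: restE, e0.1 ≤ e.1 := fun e he => hmin e (hperm.subset he)
      have hinit : (0 : Int) = (((pvCov (pvIvs y input)).filter (fun p => p < e0.1)).card : Int) := by
        have hemp : (pvCov (pvIvs y input)).filter (fun p => p < e0.1) = ∅ := by
          rw [Finset.filter_eq_empty_iff]
          intro p hp hlt
          obtain ⟨s, hs, h1, _⟩ := (pv_mem_cov _ p).1 hp
          have := hmin (s.1, 1) (List.mem_flatMap.2 ⟨s, hs, by simp [pvPair]⟩)
          simp at this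
          omega
        rw [hemp]
        simp
      have hsw := pv_sweep (pvIvs y input) hlh (e0 :: restE) [] e0.1 0
        (by simpa using hpw) (by simpa using hperm) (by simp) hmin' (by simp)
      rw [← hinit] at hsw
      show (List.foldl pvSweepStepB (0, 0, e0.1) (e0 :: restE)).1
        = ((pvCov (pvIvs y input)).card : Int)
      rw [hsw]
      have hall : (pvCov (pvIvs y input)).filter (fun p => p < pvLast e0.1 (e0 :: restE))
          = pvCov (pvIvs y input) := by
        rw [Finset.filter_eq_self]
        intro p hp
        obtain ⟨s, hs, _, h2⟩ := (pv_mem_cov _ p).1 hp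
        have hm : (s.2, -1) ∈ e0 :: restE :=
          hperm.mem_iff.2 (List.mem_flatMap.2 ⟨s, hs, by simp [pvPair]⟩)
        have := (pv_last_ge (e0 :: restE) e0.1 hpw hmin').2 (s.2, -1) hm
        simp at this
        omega
      rw [hall]
  rw [hA, hB]
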